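-- pv_equiv track=rewrite | github.com/temps-code/brecha-digital-bi | src/ingestion/skill_extraction.py | _normalize_skills
-- ===== SOURCE A (Python) =====
-- from typing import List, Dict, Optional, Set
--
-- def skill_title_case(skill: str) -> str:
--     """Normalize skill name to title case."""
--     # Special mappings
--     mappings = {
--         "nodejs": "Node.js",
--         "node.js": "Node.js",
--         "javascript": "JavaScript",
--         "typescript": "TypeScript",
--         "postgresql": "PostgreSQL",
--         "mysql": "MySQL",
--         "sqlserver": "SQL Server",
--         "mongodb": "MongoDB",
--         "graphql": "GraphQL",
--         "rest api": "REST API",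
--         "machine learning": "Machine Learning",
--         "tensorflow": "TensorFlow",
--         "pytorch": "PyTorch",
--         "scikit-learn": "Scikit-learn",
--         "c++": "C++",
--         "c#": "C#",
--         ".net": ".NET",
--         "aws": "AWS",
--         "gcp": "GCP",
--         "cicd": "CI/CD",
--         "jwt": "JWT",
--         "ssl/tls": "SSL/TLS",
--         "ui/ux": "UI/UX",
--     }
--
--     skill_lower = skill.lower().strip()
--     return mappings.get(skill_lower, skill.title())
--
-- def _normalize_skills(skills: List[str]) -> List[str]:
--     """
--     Normalize skill names.
--
--     Args:
--         skills: List of skills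
--
--     Returns:
--         Normalized list (title case, deduplicated, max 8)
--     """
--     if not skills:
--         return []
--
--     # Title case + deduplicate
--     normalized: Set[str] = set()
--     for skill in skills:
--         if isinstance(skill, str):
--             normalized.add(skill_title_case(skill))
--
--     # Sort and limit to 8
--     return sorted(list(normalized))[:8]
-- ===== SOURCE B (Python) =====
-- # B: single pass with a bounded sorted buffer of at most 8 distinct smallest normalized
-- # skills (dedup-by-membership + ordered insert + truncate), instead of set + full sort + slice;
-- # its own loop-based title-case and linear mapping lookup.
--
-- _MAPPINGS = (
--     ("nodejs", "Node.js"), ("node.js", "Node.js"), ("javascript", "JavaScript"),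
--     ("typescript", "TypeScript"), ("postgresql", "PostgreSQL"), ("mysql", "MySQL"),
--     ("sqlserver", "SQL Server"), ("mongodb", "MongoDB"), ("graphql", "GraphQL"),
--     ("rest api", "REST API"), ("machine learning", "Machine Learning"),
--     ("tensorflow", "TensorFlow"), ("pytorch", "PyTorch"), ("scikit-learn", "Scikit-learn"),
--     ("c++", "C++"), ("c#", "C#"), (".net", ".NET"), ("aws", "AWS"), ("gcp", "GCP"),
--     ("cicd", "CI/CD"), ("jwt", "JWT"), ("ssl/tls", "SSL/TLS"), ("ui/ux", "UI/UX"),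
-- )
--
--
-- def _title(s):
--     out = []
--     prev_cased = False
--     for ch in s:
--         if ch.isalpha():
--             out.append(ch.lower() if prev_cased else ch.upper())
--             prev_cased = True
--         else:
--             out.append(ch)
--             prev_cased = False
--     return "".join(out)
--
--
-- def _norm(skill):
--     key = skill.lower().strip()
--     for k, v in _MAPPINGS:
--         if k == key:
--             return v
--     return _title(skill)
--
--
-- def _normalize_skills(skills):
--     best = []  # sorted, duplicate-free, at most 8 entries: the 8 smallest distinct so far
--     for skill in skills:
--         if not isinstance(skill, str):
--             continue
--         s = _norm(skill)
--         if s in best: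
--             continue
--         i = 0
--         while i < len(best) and best[i] < s:
--             i += 1
--         best.insert(i, s)
--         del best[8:]
--     return best
-- ===== Notes on version B (the rewrite author's own statement) =====
-- stated objective: alternative
-- what changed: B replaces A's set-dedup + full sort + slice-to-8 pipeline with a single pass over the input that maintains a sorted, duplicate-free buffer of at most the 8 smallest normalized skills (membership skip, ordered insert, truncate), and uses its own loop-based title-case and a linear association-list lookup for the special mappings.
import Mathlib
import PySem

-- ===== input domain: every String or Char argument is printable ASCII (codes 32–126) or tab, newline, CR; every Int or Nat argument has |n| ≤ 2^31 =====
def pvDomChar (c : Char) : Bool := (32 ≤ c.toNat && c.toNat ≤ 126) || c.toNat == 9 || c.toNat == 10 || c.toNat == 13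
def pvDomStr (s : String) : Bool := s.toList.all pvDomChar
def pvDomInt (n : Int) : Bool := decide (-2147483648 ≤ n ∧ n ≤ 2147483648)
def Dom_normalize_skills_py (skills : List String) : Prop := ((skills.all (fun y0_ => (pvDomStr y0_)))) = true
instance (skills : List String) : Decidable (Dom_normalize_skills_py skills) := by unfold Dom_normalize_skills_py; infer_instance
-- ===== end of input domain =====

-- B replaces A's "set-dedup, sort everything, slice to 8" by a single pass that keeps a
-- sorted duplicate-free buffer of at most the 8 smallest normalized skills; same return value.

-- ===== PORT A =====

-- hand port of str.title(), exact on the printable-ASCII domain where 'cased' = isalpha: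
-- a letter is uppercased after a non-cased character, lowercased after a cased one
def pyTitleGo : List Char → Bool → List Char
  | [], _ => []
  | c :: rest, prevCased =>
    if PySem.Chars.isalpha c then
      (if prevCased then PySem.Chars.lowerChar c else PySem.Chars.upperChar c) :: pyTitleGo rest true
    else
      c :: pyTitleGo rest false

def pyTitle (s : String) : String := String.ofList (pyTitleGo s.toList false)

def skill_title_case_py (skill : String) : String :=
  let mappings : PySem.Dict String String := PySem.Dict.ofList [
    ("nodejs", "Node.js"), ("node.js", "Node.js"), ("javascript", "JavaScript"),
    ("typescript", "TypeScript"), ("postgresql", "PostgreSQL"), ("mysql", "MySQL"),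
    ("sqlserver", "SQL Server"), ("mongodb", "MongoDB"), ("graphql", "GraphQL"),
    ("rest api", "REST API"), ("machine learning", "Machine Learning"),
    ("tensorflow", "TensorFlow"), ("pytorch", "PyTorch"), ("scikit-learn", "Scikit-learn"),
    ("c++", "C++"), ("c#", "C#"), (".net", ".NET"), ("aws", "AWS"), ("gcp", "GCP"),
    ("cicd", "CI/CD"), ("jwt", "JWT"), ("ssl/tls", "SSL/TLS"), ("ui/ux", "UI/UX")]
  let skill_lower := PySem.Str.strip (PySem.Str.lower skill)
  PySem.Dict.getD mappings skill_lower (pyTitle skill)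

def normalize_skills_py (skills : List String) : List String :=
  if skills = [] then []
  else
    -- 'isinstance(skill, str)' is always true under the type convention
    let normalized : PySem.Set String :=
      skills.foldl (fun s skill => PySem.Set.add s (skill_title_case_py skill)) PySem.Set.empty
    PySem.List.slice (PySem.List.sorted normalized (fun x => x)) none (some 8)

-- ===== PORT B =====

-- B's _MAPPINGS tuple, a plain association list scanned linearly
def mappingsB : List (String × String) := [
  ("nodejs", "Node.js"), ("node.js", "Node.js"), ("javascript", "JavaScript"),
  ("typescript", "TypeScript"), ("postgresql", "PostgreSQL"), ("mysql", "MySQL"),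
  ("sqlserver", "SQL Server"), ("mongodb", "MongoDB"), ("graphql", "GraphQL"),
  ("rest api", "REST API"), ("machine learning", "Machine Learning"),
  ("tensorflow", "TensorFlow"), ("pytorch", "PyTorch"), ("scikit-learn", "Scikit-learn"),
  ("c++", "C++"), ("c#", "C#"), (".net", ".NET"), ("aws", "AWS"), ("gcp", "GCP"),
  ("cicd", "CI/CD"), ("jwt", "JWT"), ("ssl/tls", "SSL/TLS"), ("ui/ux", "UI/UX")]

-- B's 'for k, v in _MAPPINGS: if k == key: return v' loop
def lookupB : List (String × String) → String → String → String
  | [], _, dflt => dflt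
  | (k, v) :: rest, key, dflt => if k == key then v else lookupB rest key dflt

-- B's _title loop: fold over the characters carrying (prev_cased, out-buffer)
def titleStep (st : Bool × List Char) (c : Char) : Bool × List Char :=
  if PySem.Chars.isalpha c then
    (true, st.2 ++ [if st.1 then PySem.Chars.lowerChar c else PySem.Chars.upperChar c])
  else
    (false, st.2 ++ [c])

def titleB (s : String) : String :=
  String.ofList (s.toList.foldl titleStep (false, [])).2

-- B's _norm
def normB (skill : String) : String :=
  lookupB mappingsB (PySem.Str.strip (PySem.Str.lower skill)) (titleB skill)

-- B's while-loop: insert s before the first buffer element that is not < s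
def insOrd : List String → String → List String
  | [], s => [s]
  | b :: t, s => if b < s then b :: insOrd t s else s :: b :: t

-- one loop body: skip duplicates, ordered insert, 'del best[8:]'
def insCap (best : List String) (s : String) : List String :=
  if best.contains s then best else (insOrd best s).take 8

def normGo : List String → List String → List String
  | [], best => best
  | skill :: rest, best => normGo rest (insCap best (normB skill))

def normalize_skills_py_alt (skills : List String) : List String :=
  normGo skills []

-- ===== PRECONDITION & SPEC =====
def Spec_normalize_skills_py (skills : List String) (out : List String) : Prop := out = normalize_skills_py_alt skills
instance (skills : List String) (out : List String) : Decidable (Spec_normalize_skills_py skills out) := by unfold Spec_normalize_skills_py; infer_instance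

-- ===== CLAIM (what is proved, stated in full; the proofs are below) =====
def Claim_equal_normalize_skills_py : Prop := ∀ (skills : List String), Dom_normalize_skills_py skills → Spec_normalize_skills_py skills (normalize_skills_py skills)

-- ===== LEMMAS AND PROOFS =====

-- B's per-skill normalization computes A's skill_title_case
theorem titleFold (cs : List Char) : ∀ (prev : Bool) (acc : List Char),
    (cs.foldl titleStep (prev, acc)).2 = acc ++ pyTitleGo cs prev := by
  induction cs with
  | nil => intro prev acc; simp [pyTitleGo]
  | cons c t ih =>
    intro prev acc
    simp only [List.foldl_cons, titleStep, pyTitleGo]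
    by_cases h : PySem.Chars.isalpha c = true
    · simp [h, ih]
    · simp [h, ih]

theorem titleB_eq (s : String) : titleB s = pyTitle s := by
  unfold titleB pyTitle
  rw [titleFold]
  rfl

theorem getD_mk_eq_lookupB (ps : List (String × String)) (k d : String) :
    (PySem.Dict.mk ps).getD k d = lookupB ps k d := by
  induction ps with
  | nil => rfl
  | cons p t ih =>
    obtain ⟨pk, pv⟩ := p
    rw [PySem.Dict.getD_eq_get?_getD, PySem.Dict.get?_mk_cons]
    cases h : (pk == k) with
    | true => simp [lookupB, h]
    | false => simp [lookupB, h, ← PySem.Dict.getD_eq_get?_getD, ih]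

theorem normB_eq (s : String) : normB s = skill_title_case_py s := by
  unfold normB skill_title_case_py
  rw [titleB_eq, ← getD_mk_eq_lookupB]
  rfl

-- uncapped duplicate-skipping ordered insertion (proof-only reference)
def insFull (t : List String) (s : String) : List String :=
  if t.contains s then t else insOrd t s

def goFull (f : String → String) (l : List String) (t : List String) : List String :=
  l.foldl (fun acc skill => insFull acc (f skill)) t

theorem mem_insOrd (y s : String) : ∀ (t : List String), y ∈ insOrd t s ↔ y = s ∨ y ∈ t := by
  intro t
  induction t with
  | nil => simp [insOrd]
  | cons b t ih =>
    simp only [insOrd]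
    split_ifs with h
    · simp [ih]; tauto
    · simp

theorem insOrd_of_forall_lt (s : String) :
    ∀ (t : List String), (∀ b ∈ t, b < s) → insOrd t s = t ++ [s] := by
  intro t
  induction t with
  | nil => intro _; rfl
  | cons b t ih =>
    intro h
    simp only [insOrd, if_pos (h b (by simp)), List.cons_append, List.cons.injEq, true_and]
    exact ih (fun x hx => h x (by simp [hx]))

theorem take_insOrd_take (s : String) :
    ∀ (t : List String) (n : Nat), (insOrd (t.take n) s).take n = (insOrd t s).take n := by
  intro t
  induction t with
  | nil => intro n; simp
  | cons y t ih =>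
    intro n
    cases n with
    | zero => simp
    | succ m =>
      simp only [List.take_succ_cons, insOrd]
      by_cases h : y < s
      · simp only [if_pos h, List.take_succ_cons, List.cons.injEq, true_and]
        exact ih m
      · simp only [if_neg h, List.take_succ_cons, List.cons.injEq, true_and]
        cases m with
        | zero => simp
        | succ k =>
          simp only [List.take_succ_cons, List.cons.injEq, true_and, List.take_take]
          congr 1
          omega

theorem pairwise_insOrd (s : String) :
    ∀ (t : List String), t.Pairwise (· < ·) → s ∉ t → (insOrd t s).Pairwise (· < ·) := by
  intro t
  induction t with
  | nil => intro _ _; simp [insOrd]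
  | cons b t ih =>
    intro hp hs
    rw [List.pairwise_cons] at hp
    simp only [insOrd]
    by_cases h : b < s
    · rw [if_pos h, List.pairwise_cons]
      refine ⟨fun y hy => ?_, ih hp.2 (fun hm => hs (by simp [hm]))⟩
      rcases (mem_insOrd y s t).mp hy with rfl | hyt
      · exact h
      · exact hp.1 y hyt
    · rw [if_neg h, List.pairwise_cons]
      have hsb : s < b := lt_of_le_of_ne (le_of_not_gt h) (fun he => hs (by simp [he]))
      refine ⟨fun y hy => ?_, List.pairwise_cons.mpr hp⟩
      rcases List.mem_cons.mp hy with rfl | hyt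
      · exact hsb
      · exact lt_trans hsb (hp.1 y hyt)

theorem mem_insFull (y s : String) (t : List String) :
    y ∈ insFull t s ↔ y ∈ t ∨ y = s := by
  unfold insFull
  split_ifs with h
  · rw [List.contains_iff_mem] at h
    constructor
    · exact Or.inl
    · rintro (hy | rfl) <;> [exact hy; exact h]
  · rw [mem_insOrd]; tauto

theorem pairwise_insFull (s : String) (t : List String) (hp : t.Pairwise (· < ·)) :
    (insFull t s).Pairwise (· < ·) := by
  unfold insFull
  split_ifs with h
  · exact hp
  · exact pairwise_insOrd s t hp (by simpa [List.contains_iff_mem] using h)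

theorem insCap_take (s : String) (t : List String) (hp : t.Pairwise (· < ·)) :
    insCap (t.take 8) s = (insFull t s).take 8 := by
  unfold insCap insFull
  by_cases hin : s ∈ t.take 8
  · rw [if_pos (by simpa [List.contains_iff_mem] using hin),
       if_pos (by simp only [List.contains_iff_mem]; exact List.mem_of_mem_take hin)]
  · by_cases hint : s ∈ t
    · -- s sits past position 8: every kept element is smaller, the insertion falls off the end
      rw [if_neg (by simpa [List.contains_iff_mem] using hin),
         if_pos (by simpa [List.contains_iff_mem] using hint)]
      have hsplit : List.take 8 t ++ List.drop 8 t = t := List.take_append_drop 8 t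
      have hdrop : s ∈ t.drop 8 := by
        rw [← hsplit] at hint
        rcases List.mem_append.mp hint with h | h
        · exact absurd h hin
        · exact h
      have hlt : ∀ b ∈ t.take 8, b < s := by
        intro b hb
        have hp' : (List.take 8 t ++ List.drop 8 t).Pairwise (· < ·) := by rw [hsplit]; exact hp
        exact (List.pairwise_append.mp hp').2.2 b hb s hdrop
      have hlen : (t.take 8).length = 8 := by
        have hne : t.drop 8 ≠ [] := fun he => by simp [he] at hdrop
        have := List.length_pos_of_ne_nil hne
        simp only [List.length_take, List.length_drop] at this ⊢
        omega
      rw [insOrd_of_forall_lt s _ hlt]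
      rw [List.take_append_of_le_length (by omega)]
      simp [hlen]
    · rw [if_neg (by simpa [List.contains_iff_mem] using hin),
         if_neg (by simpa [List.contains_iff_mem] using hint)]
      exact take_insOrd_take s t 8

theorem normGo_take (l : List String) :
    ∀ (t : List String), t.Pairwise (· < ·) →
      normGo l (t.take 8) = (goFull skill_title_case_py l t).take 8 := by
  induction l with
  | nil => intro t _; rfl
  | cons skill rest ih =>
    intro t hp
    simp only [normGo, goFull, List.foldl_cons]
    rw [normB_eq, insCap_take _ t hp]
    exact ih (insFull t (skill_title_case_py skill)) (pairwise_insFull _ t hp)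

theorem mem_goFull (f : String → String) (y : String) (l : List String) :
    ∀ (t : List String), y ∈ goFull f l t ↔ y ∈ t ∨ ∃ sk ∈ l, y = f sk := by
  induction l with
  | nil => intro t; simp [goFull]
  | cons sk rest ih =>
    intro t
    simp only [goFull, List.foldl_cons]
    rw [show (List.foldl (fun acc skill => insFull acc (f skill)) (insFull t (f sk)) rest)
          = goFull f rest (insFull t (f sk)) from rfl, ih, mem_insFull]
    simp only [List.mem_cons]
    constructor
    · rintro ((hy | rfl) | ⟨x, hx, rfl⟩)
      · exact Or.inl hy
      · exact Or.inr ⟨sk, Or.inl rfl, rfl⟩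
      · exact Or.inr ⟨x, Or.inr hx, rfl⟩
    · rintro (hy | ⟨x, (rfl | hx), rfl⟩)
      · exact Or.inl (Or.inl hy)
      · exact Or.inl (Or.inr rfl)
      · exact Or.inr ⟨x, hx, rfl⟩

theorem pairwise_goFull (f : String → String) (l : List String) :
    ∀ (t : List String), t.Pairwise (· < ·) → (goFull f l t).Pairwise (· < ·) := by
  induction l with
  | nil => intro t hp; exact hp
  | cons sk rest ih =>
    intro t hp
    exact ih _ (pairwise_insFull _ t hp)

theorem goFull_eq_sorted (f : String → String) (l : List String) :
    goFull f l [] =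
      PySem.List.sorted (PySem.Set.ofList (l.map f)) (fun x => x) := by
  have hpw : (goFull f l []).Pairwise (· < ·) := pairwise_goFull f l [] List.Pairwise.nil
  refine (PySem.List.sorted_eq_of_perm_of_pairwise_lt _ _ (fun x => x) ?_ hpw).symm
  refine (List.perm_ext_iff_of_nodup (hpw.imp ne_of_lt) (PySem.Set.nodup_ofList _)).mpr ?_
  intro y
  rw [mem_goFull, PySem.Set.mem_ofList, List.mem_map]
  simp only [List.not_mem_nil, false_or]
  constructor
  · rintro ⟨sk, hsk, rfl⟩; exact ⟨sk, hsk, rfl⟩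
  · rintro ⟨sk, hsk, rfl⟩; exact ⟨sk, hsk, rfl⟩

-- ===== VERDICT (by name: the statement is the Claim_ definition above) =====
theorem normalize_skills_py_spec : Claim_equal_normalize_skills_py := by
  intro skills _
  unfold Spec_normalize_skills_py normalize_skills_py normalize_skills_py_alt
  by_cases h : skills = []
  · subst h; rfl
  · simp only [h, if_false]
    rw [show normGo skills [] = normGo skills (([] : List String).take 8) from rfl,
       normGo_take skills [] List.Pairwise.nil, goFull_eq_sorted,
       ← PySem.Set.update_map_eq_foldl_add,
       show PySem.Set.empty.update (skills.map skill_title_case_py)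
           = PySem.Set.ofList (skills.map skill_title_case_py) from
         PySem.Set.update_nil_left _,
       PySem.List.slice_to _ (by norm_num)]
    rfl
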